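-- pv_equiv track=rewrite | github.com/xsfeelyou/SpotiPlayGram | core/lyrics/patterns/base.py | _best_multi_pattern
-- ===== SOURCE A (Python) =====
-- def _best_multi_pattern(tokens: list[str], multi: list[list[str]]) -> list[str] | None:
--     if not tokens or not multi:
--         return None
--     n = len(tokens)
--     best: list[str] | None = None
--     for pat in multi:
--         m = len(pat)
--         if m == 0 or m > n:
--             continue
--         for i in range(0, n - m + 1):
--             if tokens[i:i + m] == pat:
--                 if best is None or m > len(best):
--                     best = pat
--                 break
--     return best
-- ===== SOURCE B (Python) =====
-- def _best_multi_pattern(tokens: list[str], multi: list[list[str]]) -> list[str] | None: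
--     n = len(tokens)
--     for pat in sorted(multi, key=len, reverse=True):
--         m = len(pat)
--         if 0 < m <= n and any(tokens[i:i + m] == pat for i in range(n - m + 1)):
--             return pat
--     return None
-- ===== Notes on version B (the rewrite author's own statement) =====
-- stated objective: alternative
-- what changed: B stably sorts the patterns by length descending and returns the first one that occurs contiguously (early exit), instead of A's single pass that keeps a running best over all patterns.
import Mathlib
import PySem

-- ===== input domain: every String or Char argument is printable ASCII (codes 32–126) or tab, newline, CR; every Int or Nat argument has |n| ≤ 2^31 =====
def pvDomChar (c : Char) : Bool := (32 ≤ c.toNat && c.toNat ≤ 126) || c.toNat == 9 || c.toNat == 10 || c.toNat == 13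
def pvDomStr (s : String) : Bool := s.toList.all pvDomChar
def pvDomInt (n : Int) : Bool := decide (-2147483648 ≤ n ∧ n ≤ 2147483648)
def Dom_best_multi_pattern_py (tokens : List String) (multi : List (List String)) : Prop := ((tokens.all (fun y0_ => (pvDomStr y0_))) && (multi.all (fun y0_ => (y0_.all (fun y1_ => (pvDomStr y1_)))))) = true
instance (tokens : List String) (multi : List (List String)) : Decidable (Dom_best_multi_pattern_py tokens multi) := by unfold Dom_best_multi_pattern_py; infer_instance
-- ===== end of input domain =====

-- B stably sorts the patterns by length descending and returns the first one occurring contiguously in tokens (early exit), instead of A's running-best pass; alternative structure, equal return values.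


-- ===== PORT A =====
def best_multi_pattern_py (tokens : List String) (multi : List (List String)) : Option (List String) :=
  if tokens = [] ∨ multi = [] then none
  else
    let n := tokens.length
    multi.foldl (fun best pat =>
      let m := pat.length
      if m = 0 ∨ n < m then best
      else
        match (List.range (n - m + 1)).find?
            (fun (i : Nat) => decide (PySem.List.slice tokens (some (i : Int)) (some ((i : Int) + (m : Int))) = pat)) with
        | some _ =>
          match best with
          | none => some pat
          | some b => if b.length < m then some pat else best
        | none => best) none

-- ===== PORT B =====
-- the guard-and-any condition of B's loop body: 0 < m <= n and any(tokens[i:i+m] == pat for i in range(n-m+1))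
def pvMatches (tokens : List String) (pat : List String) : Bool :=
  let n := tokens.length
  let m := pat.length
  decide (0 < m) && (decide (m ≤ n) &&
    (List.range (n - m + 1)).any
      (fun (i : Nat) => decide (PySem.List.slice tokens (some (i : Int)) (some ((i : Int) + (m : Int))) = pat)))

def best_multi_pattern_py_alt (tokens : List String) (multi : List (List String)) : Option (List String) :=
  (PySem.List.sorted multi (fun p => p.length) true).find? (pvMatches tokens)

-- ===== PRECONDITION & SPEC =====
def Spec_best_multi_pattern_py (tokens : List String) (multi : List (List String)) (out : Option (List String)) : Prop := out = best_multi_pattern_py_alt tokens multi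
instance (tokens : List String) (multi : List (List String)) (out : Option (List String)) : Decidable (Spec_best_multi_pattern_py tokens multi out) := by unfold Spec_best_multi_pattern_py; infer_instance

-- ===== CLAIM (what is proved, stated in full; the proofs are below) =====
def Claim_equal_best_multi_pattern_py : Prop := ∀ (tokens : List String) (multi : List (List String)), Dom_best_multi_pattern_py tokens multi → Spec_best_multi_pattern_py tokens multi (best_multi_pattern_py tokens multi)

-- ===== LEMMAS AND PROOFS =====

-- A's loop body as a standalone step function (P-guard first, then the running-best update)
def pvStep (tokens : List String) (best : Option (List String)) (pat : List String) : Option (List String) :=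
  if pvMatches tokens pat then
    match best with
    | none => some pat
    | some b => if b.length < pat.length then some pat else best
  else best

-- insertBy walks past the elements x is not 'before' and inserts x there
theorem pvInsertBy_split {α : Type} (before : α → α → Bool) (x : α) (s : List α) :
    PySem.List.insertBy before x s
      = s.takeWhile (fun y => !before x y) ++ x :: s.dropWhile (fun y => !before x y) := by
  induction s with
  | nil => rfl
  | cons y ys ih =>
    by_cases h : before x y
    · simp [PySem.List.insertBy, h]
    · simp [PySem.List.insertBy, h, ih]

-- find? through a list with x inserted after the ≥-length prefix equals A's running-best update
theorem pvFind_mid (tokens x : List String) (u v : List (List String))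
    (hu : ∀ y ∈ u, x.length ≤ y.length) (hv : ∀ z ∈ v, z.length < x.length) :
    (u ++ x :: v).find? (pvMatches tokens)
      = pvStep tokens ((u ++ v).find? (pvMatches tokens)) x := by
  rw [List.find?_append, List.find?_append]
  cases hfu : u.find? (pvMatches tokens) with
  | some y =>
    have hxy := hu y (List.mem_of_find?_eq_some hfu)
    simp only [Option.some_or]
    by_cases hPx : pvMatches tokens x
    · simp [pvStep, hPx, Nat.not_lt.mpr hxy]
    · simp [pvStep, hPx]
  | none =>
    simp only [Option.none_or]
    by_cases hPx : pvMatches tokens x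
    · rw [List.find?_cons_of_pos hPx]
      cases hfv : v.find? (pvMatches tokens) with
      | none => simp [pvStep, hPx]
      | some z =>
        have hz := hv z (List.mem_of_find?_eq_some hfv)
        simp [pvStep, hPx, hz]
    · rw [List.find?_cons_of_neg (by simp [hPx])]
      simp [pvStep, hPx]

-- one insertion step: find?-after-insert equals A's running-best update, on a length-nonincreasing list
theorem pvFind_insertBy (tokens x : List String) (s : List (List String))
    (hs : s.Pairwise (fun a b => b.length ≤ a.length)) :
    (PySem.List.insertBy (fun a b => decide (b.length < a.length)) x s).find? (pvMatches tokens)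
      = pvStep tokens (s.find? (pvMatches tokens)) x := by
  rw [pvInsertBy_split]
  have hu_len : ∀ y ∈ s.takeWhile (fun y => !decide (y.length < x.length)), x.length ≤ y.length := by
    intro y hy
    have h := List.mem_takeWhile_imp hy
    simp at h
    omega
  have hv_len : ∀ z ∈ s.dropWhile (fun y => !decide (y.length < x.length)), z.length < x.length := by
    intro z hz
    cases hvv : s.dropWhile (fun y => !decide (y.length < x.length)) with
    | nil => simp [hvv] at hz
    | cons h t =>
      have hh : ¬ (fun y => !decide (y.length < x.length)) h := by
        have hhd := List.head?_dropWhile_not (fun y => !decide (y.length < x.length)) s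
        rw [hvv] at hhd
        simpa using hhd
      have hhx : h.length < x.length := by
        simp at hh
        omega
      have hpv : (h :: t).Pairwise (fun a b => b.length ≤ a.length) := by
        rw [← hvv]
        exact List.Pairwise.sublist (List.dropWhile_sublist _) hs
      rw [hvv] at hz
      rcases List.mem_cons.mp hz with rfl | hzt
      · exact hhx
      · have := (List.pairwise_cons.mp hpv).1 z hzt
        omega
  rw [pvFind_mid tokens x _ _ hu_len hv_len, List.takeWhile_append_dropWhile]

-- A's fold body computes exactly pvStep
theorem pvBody_eq (tokens : List String) (best : Option (List String)) (pat : List String) :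
    (if pat.length = 0 ∨ tokens.length < pat.length then best
     else
       match (List.range (tokens.length - pat.length + 1)).find?
           (fun (i : Nat) => decide (PySem.List.slice tokens (some (i : Int)) (some ((i : Int) + (pat.length : Int))) = pat)) with
       | some _ =>
         match best with
         | none => some pat
         | some b => if b.length < pat.length then some pat else best
       | none => best)
      = pvStep tokens best pat := by
  by_cases hg : pat.length = 0 ∨ tokens.length < pat.length
  · have hfalse : pvMatches tokens pat = false := by
      simp [pvMatches]
      intro h1 h2
      omega
    rw [if_pos hg]
    simp [pvStep, hfalse]
  · rw [if_neg hg]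
    have h1 : 0 < pat.length := by omega
    have h2 : pat.length ≤ tokens.length := by omega
    have hm : pvMatches tokens pat
        = (List.range (tokens.length - pat.length + 1)).any
            (fun (i : Nat) => decide (PySem.List.slice tokens (some (i : Int)) (some ((i : Int) + (pat.length : Int))) = pat)) := by
      simp [pvMatches, h1, h2]
    cases hf : (List.range (tokens.length - pat.length + 1)).find?
        (fun (i : Nat) => decide (PySem.List.slice tokens (some (i : Int)) (some ((i : Int) + (pat.length : Int))) = pat)) with
    | some i =>
      have hany : (List.range (tokens.length - pat.length + 1)).any
          (fun (i : Nat) => decide (PySem.List.slice tokens (some (i : Int)) (some ((i : Int) + (pat.length : Int))) = pat)) := by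
        have hmem := List.mem_of_find?_eq_some hf
        have hpi := List.find?_some hf
        exact List.any_eq_true.mpr ⟨i, hmem, hpi⟩
      simp [pvStep, hm, hany]
    | none =>
      have hany : (List.range (tokens.length - pat.length + 1)).any
          (fun (i : Nat) => decide (PySem.List.slice tokens (some (i : Int)) (some ((i : Int) + (pat.length : Int))) = pat)) = false := by
        simp only [List.any_eq_false]
        intro i hi
        have h := List.find?_eq_none.mp hf i hi
        simpa using h
      simp [pvStep, hm, hany]

-- the heart: running-best fold over multi = first hit in the stable length-descending sort
theorem pvMain (tokens : List String) (multi : List (List String)) :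
    multi.foldl (pvStep tokens) none
      = (PySem.List.sorted multi (fun p => p.length) true).find? (pvMatches tokens) := by
  induction multi using List.reverseRecOn with
  | nil => rfl
  | append_singleton l x ih =>
    rw [List.foldl_append, List.foldl_cons, List.foldl_nil, ih]
    have hsort : PySem.List.sorted (l ++ [x]) (fun p : List String => p.length) true
        = PySem.List.insertBy (fun a b => decide (b.length < a.length)) x
            (PySem.List.sorted l (fun p : List String => p.length) true) := by
      rw [PySem.List.sorted_rev_eq_foldl_insertBy, PySem.List.sorted_rev_eq_foldl_insertBy,
          List.foldl_append, List.foldl_cons, List.foldl_nil]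
    rw [hsort, pvFind_insertBy tokens x _ (PySem.List.sorted_pairwise_rev l (fun p => p.length))]

-- with no tokens nothing matches
theorem pvFind_nil_tokens (l : List (List String)) :
    l.find? (pvMatches []) = none := by
  apply List.find?_eq_none.mpr
  intro pat _
  simp [pvMatches]
  rintro hlen rfl
  simp at hlen

-- ===== VERDICT (by name: the statement is the Claim_ definition above) =====
theorem best_multi_pattern_py_spec : Claim_equal_best_multi_pattern_py := by
  intro tokens multi _
  unfold Spec_best_multi_pattern_py best_multi_pattern_py best_multi_pattern_py_alt
  by_cases h : tokens = [] ∨ multi = []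
  · rw [if_pos h]
    rcases h with rfl | rfl
    · rw [pvFind_nil_tokens]
    · rfl
  · rw [if_neg h]
    refine Eq.trans ?_ (pvMain tokens multi)
    show multi.foldl (fun (best : Option (List String)) (pat : List String) =>
        if pat.length = 0 ∨ tokens.length < pat.length then best
        else
          match (List.range (tokens.length - pat.length + 1)).find?
              (fun (i : Nat) => decide (PySem.List.slice tokens (some (i : Int)) (some ((i : Int) + (pat.length : Int))) = pat)) with
          | some _ =>
            match best with
            | none => some pat
            | some b => if b.length < pat.length then some pat else best
          | none => best) none = multi.foldl (pvStep tokens) none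
    congr 1
    funext best pat
    exact pvBody_eq tokens best pat
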